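-- pv_equiv track=rewrite | github.com/Zohaib666/Advent-of-code- | AOC/aoc_day17_part2.py | rec
-- ===== SOURCE A (Python) =====
-- prog = [2,4,1,5,7,5,0,3,4,1,1,6,5,5,3,0]  # Program sequence
--
-- def run(prog, a, b, c):
--     def combo(num):
--         if num <= 3:
--             return num
--         elif num == 4:
--             return a
--         elif num == 5:
--             return b
--         elif num == 6:
--             return c
--
--     o = []
--     ip = 0
--     while ip < len(prog):
--         instr = prog[ip]
--         operand = prog[ip + 1]
--         if instr == 0:
--             a = a // (2 ** combo(operand))
--         elif instr == 1:
--             b = b ^ operand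
--         elif instr == 2:
--             b = combo(operand) % 8
--         elif instr == 3:
--             if a != 0:
--                 ip = operand - 2
--         elif instr == 4:
--             b = b ^ c
--         elif instr == 5:
--             o.append(combo(operand) % 8)
--         elif instr == 6:
--             b = a // (2 ** combo(operand))
--         elif instr == 7:
--             c = a // (2 ** combo(operand))
--         ip += 2
--     return o
--
-- def rec(n, a):
--     if n == -1:
--         return a
--     a <<= 3
--     for x in range(8):
--         if run(prog, a + x, 0, 0) == prog[n:]:
--             s = rec(n - 1, a + x)
--             if s != -1:
--                 return s
--     return -1
-- ===== SOURCE B (Python) =====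
-- prog = [2,4,1,5,7,5,0,3,4,1,1,6,5,5,3,0]  # Program sequence
--
-- def outdigits(a):
--     # direct evaluation of `prog` specialised to this program: per 3-bit chunk of a
--     # it emits ((a%8)^5) ^ (a >> ((a%8)^5)) ^ 6, mod 8, then shifts a down by 3.
--     o = []
--     while True:
--         d = (a % 8) ^ 5
--         d = d ^ (a >> d) ^ 6
--         o.append(d % 8)
--         a //= 8
--         if a == 0:
--             return o
--
-- def rec(n, a):
--     # breadth-first: build, level by level, ALL prefixes whose specialised output
--     # matches the required tail; the minimum complete value equals the DFS's first find.
--     cands = [a]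
--     m = n
--     while m != -1 and cands:
--         want = prog[m:]
--         cands = [c * 8 + x for c in cands for x in range(8)
--                  if outdigits(c * 8 + x) == want]
--         m -= 1
--     return min(cands) if cands else -1
-- ===== Notes on version B (the rewrite author's own statement) =====
-- stated objective: alternative
-- what changed: Replaces the recursive depth-first backtracking that tests each candidate by running the 16-instruction VM with an iterative breadth-first search that keeps ALL matching prefixes per level and tests each candidate with the program specialised to the fixed instruction list (one xor/shift formula per 3-bit chunk), returning the minimum complete match (equal to the DFS's first find since equal-length octal strings order numerically).
import Mathlib
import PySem

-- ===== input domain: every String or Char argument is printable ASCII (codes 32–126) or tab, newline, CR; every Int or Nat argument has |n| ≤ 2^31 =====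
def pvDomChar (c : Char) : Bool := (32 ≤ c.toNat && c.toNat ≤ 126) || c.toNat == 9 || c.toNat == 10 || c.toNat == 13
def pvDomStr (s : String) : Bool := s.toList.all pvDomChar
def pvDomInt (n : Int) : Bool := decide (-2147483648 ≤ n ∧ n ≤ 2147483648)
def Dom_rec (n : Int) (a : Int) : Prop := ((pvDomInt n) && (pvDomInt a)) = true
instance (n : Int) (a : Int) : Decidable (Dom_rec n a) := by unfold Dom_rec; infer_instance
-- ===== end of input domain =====

-- B replaces A's depth-first backtracking over the general VM by a breadth-first
-- level-by-level search testing candidates with the program specialised to `prog`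
-- (a per-3-bit-chunk formula), taking the minimum complete match at the end.

-- ===== PORT A =====
def prog : List Int := [2, 4, 1, 5, 7, 5, 0, 3, 4, 1, 1, 6, 5, 5, 3, 0]

-- combo(num); the final 0 is Python's None branch, unreachable: every combo operand of `prog` is ≤ 6
def combo (a b c num : Int) : Int :=
  if num ≤ 3 then num
  else if num = 4 then a
  else if num = 5 then b
  else if num = 6 then c
  else 0

-- 2 ** e; the exponent is nonnegative in every reachable state of `run` on `prog`
def pow2 (e : Int) : Int := if 0 ≤ e then 2 ^ e.toNat else 0

-- the while-loop of `run`; fuel counts executed instructions (ample for every input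
-- admitted by Pre_: each pass of the loop divides a by 8, so ≤ a few hundred are run)
def runAux : Nat → List Int → Int → Int → Int → Int → List Int → List Int
  | 0, _, _, _, _, _, o => o
  | f+1, p, a, b, c, ip, o =>
    if ip < (p.length : Int) then
      let instr := PySem.List.pyGetD p ip 0
      let operand := PySem.List.pyGetD p (ip + 1) 0
      if instr = 0 then runAux f p (PySem.Int.floordiv a (pow2 (combo a b c operand))) b c (ip + 2) o
      else if instr = 1 then runAux f p a (PySem.Int.bxor b operand) c (ip + 2) o
      else if instr = 2 then runAux f p a (PySem.Int.mod (combo a b c operand) 8) c (ip + 2) o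
      else if instr = 3 then
        (if a ≠ 0 then runAux f p a b c ((operand - 2) + 2) o else runAux f p a b c (ip + 2) o)
      else if instr = 4 then runAux f p a (PySem.Int.bxor b c) c (ip + 2) o
      else if instr = 5 then runAux f p a b c (ip + 2) (o ++ [PySem.Int.mod (combo a b c operand) 8])
      else if instr = 6 then runAux f p a (PySem.Int.floordiv a (pow2 (combo a b c operand))) c (ip + 2) o
      else if instr = 7 then runAux f p a b (PySem.Int.floordiv a (pow2 (combo a b c operand))) (ip + 2) o
      else runAux f p a b c (ip + 2) o
    else o

def run (p : List Int) (a b c : Int) : List Int := runAux 10000 p a b c 0 []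

-- the `for x in range(8)` loop with early return; rc is the recursive call at n-1
def recLoop (rc : Int → Int) (m a : Int) : List Int → Int
  | [] => -1
  | x :: xs =>
    if run prog (a + x) 0 0 = PySem.List.slice prog (some m) none then
      let s := rc (a + x)
      if s ≠ -1 then s else recLoop rc m a xs
    else recLoop rc m a xs

-- fuel = n + 2 suffices: n drops by 1 per level and the base case is n = -1
-- (for n ≤ -2 the fuel is 0 and the port returns -1, which is what Python A
--  eventually returns there for a ≥ 0; a < 0 with n ≠ -1 is excluded by Pre_)
def recAux : Nat → Int → Int → Int
  | 0, _, _ => -1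
  | f+1, n, a =>
    if n = -1 then a
    else recLoop (fun a' => recAux f (n - 1) a') n (a * 8) [0, 1, 2, 3, 4, 5, 6, 7]

def rec (n : Int) (a : Int) : Int := recAux (n + 2).toNat n a

-- ===== PORT B =====
-- one output chunk of the specialised program; the shift amount (a % 8) ^ 5 lies in
-- [0, 7], so `.toNat` on it is exact
def digitB (a : Int) : Int :=
  let d1 := PySem.Int.bxor (PySem.Int.mod a 8) 5
  PySem.Int.mod (PySem.Int.bxor (PySem.Int.bxor d1 (a >>> d1.toNat)) 6) 8

-- the while-loop of `outdigits`; for a < 0 Python diverges (those calls are excluded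
-- by Pre_): the port then returns a single chunk to stay total
def outB (a : Int) : List Int :=
  if h : PySem.Int.floordiv a 8 = 0 ∨ a < 0 then [digitB a]
  else digitB a :: outB (PySem.Int.floordiv a 8)
termination_by a.toNat
decreasing_by
  rw [PySem.Int.floordiv_eq_ediv_of_pos (by omega)] at *
  omega

-- one pass of the while loop: all matching one-chunk extensions of every candidate
def step (m : Int) (cs : List Int) : List Int :=
  let want := PySem.List.slice prog (some m) none
  cs.flatMap (fun c =>
    (PySem.List.pyRange 0 8 1).filterMap (fun x =>
      if outB (c * 8 + x) = want then some (c * 8 + x) else none))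

-- the while loop of B; fuel = n + 1 levels (m = -1 exactly when fuel runs out)
def recAltAux : Nat → Int → List Int → Int
  | 0, m, cs =>
    if m = -1 then
      (match PySem.List.min? cs (fun v => v) with
       | some v => v
       | none => -1)
    else -1
  | f+1, m, cs => if cs = [] then -1 else recAltAux f (m - 1) (step m cs)

def rec_alt (n : Int) (a : Int) : Int := recAltAux (n + 1).toNat n [a]

-- ===== PRECONDITION & SPEC =====
-- Pre_ excludes only inputs on which A never returns: for n ≠ -1 and a < 0 the very
-- first run(prog, 8*a+x, 0, 0) loops forever (a // 8 never reaches 0), so A diverges.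
def Pre_rec (n : Int) (a : Int) : Prop := 0 ≤ a ∨ n = -1
instance (n : Int) (a : Int) : Decidable (Pre_rec n a) := by unfold Pre_rec; infer_instance
def pvWitness_rec : Int × Int := (3, 0)

def Spec_rec (n : Int) (a : Int) (out : Int) : Prop := out = rec_alt n a
instance (n : Int) (a : Int) (out : Int) : Decidable (Spec_rec n a out) := by unfold Spec_rec; infer_instance

-- ===== CLAIM (what is proved, stated in full; the proofs are below) =====
def Claim_equal_rec : Prop := ∀ (n : Int) (a : Int), Dom_rec n a → Pre_rec n a → Spec_rec n a (rec n a)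

-- ===== LEMMAS AND PROOFS =====

-- ---- the specialised program: run prog a 0 0 = outB a for bounded nonnegative a ----

theorem runAux_exit (f : Nat) (a b c : Int) (o : List Int) :
    runAux f prog a b c 16 o = o := by
  cases f with
  | zero => rfl
  | succ f => rw [runAux]; norm_num [prog]

theorem s0 (f : Nat) (a b c : Int) (o : List Int) :
    runAux (f+1) prog a b c 0 o = runAux f prog a (PySem.Int.mod a 8) c 2 o := by
  rw [runAux]
  norm_num [show ((prog.length : Nat) : Int) = 16 from by decide,
            show PySem.List.pyGetD prog 0 0 = (2:Int) from by decide,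
            show PySem.List.pyGetD prog 1 0 = (4:Int) from by decide, combo]

theorem s1 (f : Nat) (a b c : Int) (o : List Int) :
    runAux (f+1) prog a b c 2 o = runAux f prog a (PySem.Int.bxor b 5) c 4 o := by
  rw [runAux]
  norm_num [show ((prog.length : Nat) : Int) = 16 from by decide,
            show PySem.List.pyGetD prog 2 0 = (1:Int) from by decide,
            show PySem.List.pyGetD prog 3 0 = (5:Int) from by decide, combo]

theorem s2 (f : Nat) (a b c : Int) (o : List Int) :
    runAux (f+1) prog a b c 4 o = runAux f prog a b (PySem.Int.floordiv a (pow2 b)) 6 o := by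
  rw [runAux]
  norm_num [show ((prog.length : Nat) : Int) = 16 from by decide,
            show PySem.List.pyGetD prog 4 0 = (7:Int) from by decide,
            show PySem.List.pyGetD prog 5 0 = (5:Int) from by decide, combo]

theorem s3 (f : Nat) (a b c : Int) (o : List Int) :
    runAux (f+1) prog a b c 6 o = runAux f prog (PySem.Int.floordiv a (pow2 3)) b c 8 o := by
  rw [runAux]
  norm_num [show ((prog.length : Nat) : Int) = 16 from by decide,
            show PySem.List.pyGetD prog 6 0 = (0:Int) from by decide,
            show PySem.List.pyGetD prog 7 0 = (3:Int) from by decide, combo]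

theorem s4 (f : Nat) (a b c : Int) (o : List Int) :
    runAux (f+1) prog a b c 8 o = runAux f prog a (PySem.Int.bxor b c) c 10 o := by
  rw [runAux]
  norm_num [show ((prog.length : Nat) : Int) = 16 from by decide,
            show PySem.List.pyGetD prog 8 0 = (4:Int) from by decide,
            show PySem.List.pyGetD prog 9 0 = (1:Int) from by decide, combo]

theorem s5 (f : Nat) (a b c : Int) (o : List Int) :
    runAux (f+1) prog a b c 10 o = runAux f prog a (PySem.Int.bxor b 6) c 12 o := by
  rw [runAux]
  norm_num [show ((prog.length : Nat) : Int) = 16 from by decide,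
            show PySem.List.pyGetD prog 10 0 = (1:Int) from by decide,
            show PySem.List.pyGetD prog 11 0 = (6:Int) from by decide, combo]

theorem s6 (f : Nat) (a b c : Int) (o : List Int) :
    runAux (f+1) prog a b c 12 o = runAux f prog a b c 14 (o ++ [PySem.Int.mod b 8]) := by
  rw [runAux]
  norm_num [show ((prog.length : Nat) : Int) = 16 from by decide,
            show PySem.List.pyGetD prog 12 0 = (5:Int) from by decide,
            show PySem.List.pyGetD prog 13 0 = (5:Int) from by decide, combo]

theorem s7 (f : Nat) (a b c : Int) (o : List Int) :
    runAux (f+1) prog a b c 14 o =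
      (if a ≠ 0 then runAux f prog a b c 0 o else runAux f prog a b c 16 o) := by
  rw [runAux]
  norm_num [show ((prog.length : Nat) : Int) = 16 from by decide,
            show PySem.List.pyGetD prog 14 0 = (3:Int) from by decide,
            show PySem.List.pyGetD prog 15 0 = (0:Int) from by decide, combo]

-- one full pass of the loop over `prog`
theorem pass (f : Nat) (a b c : Int) (o : List Int) :
    runAux (f+8) prog a b c 0 o =
      (let b1 := PySem.Int.bxor (PySem.Int.mod a 8) 5
       let c1 := PySem.Int.floordiv a (pow2 b1)
       let a1 := PySem.Int.floordiv a (pow2 3)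
       let b2 := PySem.Int.bxor (PySem.Int.bxor b1 c1) 6
       let o1 := o ++ [PySem.Int.mod b2 8]
       if a1 = 0 then o1 else runAux f prog a1 b2 c1 0 o1) := by
  show runAux (f+7+1) prog a b c 0 o = _
  rw [s0]
  show runAux (f+6+1) prog _ _ _ 2 o = _
  rw [s1]
  show runAux (f+5+1) prog _ _ _ 4 o = _
  rw [s2]
  show runAux (f+4+1) prog _ _ _ 6 o = _
  rw [s3]
  show runAux (f+3+1) prog _ _ _ 8 o = _
  rw [s4]
  show runAux (f+2+1) prog _ _ _ 10 o = _
  rw [s5]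
  show runAux (f+1+1) prog _ _ _ 12 o = _
  rw [s6]
  show runAux (f+1) prog _ _ _ 14 _ = _
  rw [s7]
  by_cases h : PySem.Int.floordiv a (pow2 3) = 0 <;> simp [h, runAux_exit]

theorem pow2_three : pow2 3 = 8 := by decide

-- ¬-trivial facts about the shift in digitB
theorem b1_range (a : Int) :
    0 ≤ PySem.Int.bxor (PySem.Int.mod a 8) 5 ∧ PySem.Int.bxor (PySem.Int.mod a 8) 5 < 8 := by
  have h0 : 0 ≤ PySem.Int.mod a 8 := PySem.Int.mod_nonneg a (by norm_num)
  have h1 : PySem.Int.mod a 8 < 8 := PySem.Int.mod_lt a (by norm_num)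
  rw [PySem.Int.bxor_of_nonneg h0 (by norm_num)]
  have h2 : (PySem.Int.mod a 8).toNat < 8 := by omega
  set t := (PySem.Int.mod a 8).toNat with ht
  interval_cases t <;> decide

theorem shr_eq_floordiv_pow2 (a e : Int) (ha : 0 ≤ a) (he : 0 ≤ e) :
    a >>> e.toNat = PySem.Int.floordiv a (pow2 e) := by
  obtain ⟨m, rfl⟩ := Int.eq_ofNat_of_zero_le ha
  obtain ⟨k, rfl⟩ := Int.eq_ofNat_of_zero_le he
  have hp : pow2 (k : Int) = ((2 ^ k : Nat) : Int) := by
    simp [pow2, he]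
  rw [hp]
  have h1 : ((m : Int) >>> ((k : Int)).toNat) = ((m >>> k : Nat) : Int) := by
    simp [Int.natCast_shiftRight]
  rw [h1, PySem.Int.floordiv_natCast, Nat.shiftRight_eq_div_pow]

-- the registers computed by a pass produce exactly digitB
theorem pass_digit (a : Int) (ha : 0 ≤ a) :
    PySem.Int.mod (PySem.Int.bxor (PySem.Int.bxor (PySem.Int.bxor (PySem.Int.mod a 8) 5)
      (PySem.Int.floordiv a (pow2 (PySem.Int.bxor (PySem.Int.mod a 8) 5)))) 6) 8 = digitB a := by
  rw [← shr_eq_floordiv_pow2 a _ ha (b1_range a).1]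
  rfl

theorem outB_single (a : Int) (h : PySem.Int.floordiv a 8 = 0) : outB a = [digitB a] := by
  rw [outB]; exact dif_pos (Or.inl h)

theorem outB_cons (a : Int) (ha : 0 ≤ a) (h : PySem.Int.floordiv a 8 ≠ 0) :
    outB a = digitB a :: outB (PySem.Int.floordiv a 8) := by
  rw [outB]; exact dif_neg (not_or.mpr ⟨h, not_lt.mpr ha⟩)

theorem outB_length_pos (a : Int) : 0 < (outB a).length := by
  rw [outB]
  split <;> simp

theorem fd8_nonneg (a : Int) (ha : 0 ≤ a) : 0 ≤ PySem.Int.floordiv a 8 := by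
  rw [PySem.Int.floordiv_eq_ediv_of_pos (by norm_num)]; omega

-- the VM on `prog` emits exactly outB, for any start registers b c
theorem run_faithful (k : Nat) : ∀ (a : Int), 0 ≤ a → (outB a).length ≤ k →
    ∀ (f : Nat) (b c : Int) (o : List Int), 8 * k ≤ f →
      runAux f prog a b c 0 o = o ++ outB a := by
  induction k with
  | zero =>
      intro a _ hlen
      have := outB_length_pos a
      omega
  | succ k ih =>
      intro a ha hlen f b c o hf
      have hfe : f = (f - 8) + 8 := by omega
      rw [hfe, pass]
      simp only [pow2_three]
      by_cases h0 : PySem.Int.floordiv a 8 = 0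
      · rw [if_pos h0, outB_single a h0, pass_digit a ha]
      · rw [if_neg h0, outB_cons a ha h0]
        have ha' : 0 ≤ PySem.Int.floordiv a 8 := fd8_nonneg a ha
        have hlen' : (outB (PySem.Int.floordiv a 8)).length ≤ k := by
          rw [outB_cons a ha h0] at hlen
          simpa using hlen
        rw [ih (PySem.Int.floordiv a 8) ha' hlen' (f - 8) _ _ _ (by omega)]
        rw [pass_digit a ha, List.append_assoc]
        rfl

theorem outB_len_le (k : Nat) : ∀ (a : Int), 0 ≤ a → a < 8 ^ (k + 1) → (outB a).length ≤ k + 1 := by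
  induction k with
  | zero =>
      intro a ha hb
      have h0 : PySem.Int.floordiv a 8 = 0 := by
        rw [PySem.Int.floordiv_eq_ediv_of_pos (by norm_num)]
        omega
      rw [outB_single a h0]; simp
  | succ k ih =>
      intro a ha hb
      by_cases h0 : PySem.Int.floordiv a 8 = 0
      · rw [outB_single a h0]; simp
      · rw [outB_cons a ha h0]
        have ha' : 0 ≤ PySem.Int.floordiv a 8 := fd8_nonneg a ha
        have hb' : PySem.Int.floordiv a 8 < 8 ^ (k + 1) := by
          rw [PySem.Int.floordiv_eq_ediv_of_pos (by norm_num)]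
          have : (8:Int) ^ (k + 1 + 1) = 8 ^ (k + 1) * 8 := by ring
          rw [this] at hb
          omega
        have := ih _ ha' hb'
        simp only [List.length_cons]
        omega

theorem outB_len_ge (k : Nat) : ∀ (a : Int), (8:Int) ^ k ≤ a → k + 1 ≤ (outB a).length := by
  induction k with
  | zero => intro a _; have := outB_length_pos a; omega
  | succ k ih =>
      intro a hb
      have ha : 0 ≤ a := le_trans (by positivity) hb
      have h0 : PySem.Int.floordiv a 8 ≠ 0 := by
        rw [PySem.Int.floordiv_eq_ediv_of_pos (by norm_num)]
        have : (8:Int) ^ (k + 1) = 8 ^ k * 8 := by ring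
        rw [this] at hb
        have hk : (1:Int) ≤ 8 ^ k := one_le_pow₀ (by norm_num)
        intro hz
        omega
      rw [outB_cons a ha h0]
      have hb' : (8:Int) ^ k ≤ PySem.Int.floordiv a 8 := by
        rw [PySem.Int.floordiv_eq_ediv_of_pos (by norm_num)]
        have : (8:Int) ^ (k + 1) = 8 ^ k * 8 := by ring
        rw [this] at hb
        omega
      have := ih _ hb'
      simp only [List.length_cons]
      omega

theorem run_eq_outB (v : Int) (hv : 0 ≤ v) (hb : v < 8 ^ 18) : run prog v 0 0 = outB v := by
  unfold run
  rw [run_faithful 18 v hv (outB_len_le 17 v hv hb) 10000 0 0 [] (by norm_num)]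
  rfl

-- ---- shared search-tree view (built from B's test outB) ----

theorem range8 : PySem.List.pyRange 0 8 1 = [0, 1, 2, 3, 4, 5, 6, 7] := by decide

-- the children of one candidate (proof-only view of `step`)
def kidsL (m c : Int) (xs : List Int) : List Int :=
  xs.filterMap
    (fun x => if outB (c * 8 + x) = PySem.List.slice prog (some m) none
              then some (c * 8 + x) else none)

def kids (m c : Int) : List Int := kidsL m c [0, 1, 2, 3, 4, 5, 6, 7]

theorem step_eq_flatMap (m : Int) (cs : List Int) : step m cs = cs.flatMap (kids m) := by
  unfold step kids kidsL
  rw [range8]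

-- iterate `step` with no early exit (proof-only)
def iter : Nat → Int → List Int → List Int
  | 0, _, cs => cs
  | f+1, m, cs => iter f (m - 1) (step m cs)

theorem iter_nil (f : Nat) (m : Int) : iter f m [] = [] := by
  induction f generalizing m with
  | zero => rfl
  | succ f ih => simp [iter, step, ih]

theorem iter_append (f : Nat) (m : Int) (cs ds : List Int) :
    iter f m (cs ++ ds) = iter f m cs ++ iter f m ds := by
  induction f generalizing m cs ds with
  | zero => rfl
  | succ f ih => simp [iter, step_eq_flatMap, List.flatMap_append, ih]

theorem iter_flat (f : Nat) (m : Int) (cs : List Int) :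
    iter f m cs = cs.flatMap (fun c => iter f m [c]) := by
  induction cs with
  | nil => simp [iter_nil]
  | cons c cs ih =>
      have : (c :: cs) = [c] ++ cs := rfl
      rw [this, iter_append, ih]; simp

theorem mem_kidsL (m c v : Int) (xs : List Int) (h : v ∈ kidsL m c xs) :
    ∃ x ∈ xs, v = c * 8 + x := by
  unfold kidsL at h
  simp only [List.mem_filterMap] at h
  obtain ⟨x, hx, hv⟩ := h
  by_cases hc : outB (c * 8 + x) = PySem.List.slice prog (some m) none
  · simp [hc] at hv; exact ⟨x, hx, hv.symm⟩
  · simp [hc] at hv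

theorem mem_kids_bound (m c v : Int) (h : v ∈ kids m c) : c * 8 ≤ v ∧ v < c * 8 + 8 := by
  obtain ⟨x, hx, hv⟩ := mem_kidsL m c v _ h
  have hb : 0 ≤ x ∧ x ≤ 7 := by
    simp only [List.mem_cons, List.not_mem_nil, or_false] at hx
    rcases hx with h|h|h|h|h|h|h|h <;> omega
  omega

-- every complete value built from candidate c over f levels lies in [c·8^f, (c+1)·8^f)
theorem iter_bound (f : Nat) (m c v : Int) (h : v ∈ iter f m [c]) :
    c * 8 ^ f ≤ v ∧ v < (c + 1) * 8 ^ f := by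
  induction f generalizing m c v with
  | zero =>
      simp [iter] at h; subst h; constructor <;> nlinarith
  | succ f ih =>
      have hstep : iter (f+1) m [c] = iter f (m - 1) (kids m c) := by
        simp [iter, step_eq_flatMap]
      rw [hstep, iter_flat] at h
      simp only [List.mem_flatMap] at h
      obtain ⟨c', hc', hv⟩ := h
      obtain ⟨hlo, hhi⟩ := mem_kids_bound m c c' hc'
      obtain ⟨hlo', hhi'⟩ := ih (m - 1) c' v hv
      have hp : (0:Int) < 8 ^ f := by positivity
      constructor
      · calc c * 8 ^ (f+1) = (c * 8) * 8 ^ f := by ring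
          _ ≤ c' * 8 ^ f := by nlinarith
          _ ≤ v := hlo'
      · calc v < (c' + 1) * 8 ^ f := hhi'
          _ ≤ (c * 8 + 8) * 8 ^ f := by nlinarith
          _ = (c + 1) * 8 ^ (f+1) := by ring

theorem iter_nonneg (f : Nat) (m c v : Int) (hc : 0 ≤ c) (h : v ∈ iter f m [c]) : 0 ≤ v := by
  have := (iter_bound f m c v h).1
  have hp : (0:Int) < 8 ^ f := by positivity
  nlinarith

-- B's loop computes: min of the BFS-final candidate list (−1 if empty)
theorem recAltAux_eq_min (f : Nat) (m : Int) (cs : List Int) (hm : m = (f : Int) - 1) :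
    recAltAux f m cs =
      (match PySem.List.min? (iter f m cs) (fun v => v) with
       | some v => v
       | none => -1) := by
  induction f generalizing m cs with
  | zero =>
      have : m = -1 := by omega
      simp [recAltAux, iter, this]
  | succ f ih =>
      have hm' : m ≠ -1 := by omega
      by_cases h : cs = []
      · subst h
        simp [recAltAux, iter_nil, PySem.List.min?]
      · have h1 : recAltAux (f+1) m cs = recAltAux f (m - 1) (step m cs) := by
          simp [recAltAux, h]
        have h2 : iter (f+1) m cs = iter f (m - 1) (step m cs) := rfl
        rw [h1, h2, ih (m - 1) (step m cs) (by omega)]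

-- matched candidates are small: the required tail has at most 16 chunks
theorem slice_prog_len (m : Int) : (PySem.List.slice prog (some m) none).length ≤ 16 := by
  rw [PySem.List.slice_some_none]
  simp [prog]

theorem matched_bound (m v : Int) (h : outB v = PySem.List.slice prog (some m) none) :
    v ≤ (8:Int) ^ 16 := by
  by_contra hv
  have h1 : 16 + 1 ≤ (outB v).length := outB_len_ge 16 v (le_of_lt (lt_of_not_ge hv))
  have h2 := slice_prog_len m
  rw [h] at h1
  omega

-- A's run-test agrees with B's outB-test on the candidates the search reaches
theorem run_test_eq (c x : Int) (hc : 0 ≤ c) (hb : c ≤ (8:Int) ^ 16) (hx : 0 ≤ x) (hx7 : x ≤ 7) :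
    run prog (c * 8 + x) 0 0 = outB (c * 8 + x) := by
  apply run_eq_outB
  · omega
  · have : (8:Int) ^ 18 = 8 ^ 16 * 64 := by ring
    rw [this]
    nlinarith

-- A's DFS computes: the FIRST element of that same list (−1 if empty)
theorem recLoop_eq_head (f : Nat) (m c : Int) (xs : List Int)
    (hm : m - 1 = (f : Int) - 1) (hc : 0 ≤ c) (hcb : c ≤ (8:Int) ^ 16)
    (hxs : ∀ x ∈ xs, 0 ≤ x ∧ x ≤ 7)
    (ihrec : ∀ c', 0 ≤ c' → c' ≤ (8:Int) ^ 16 → recAux (f+1) ((f : Int) - 1) c' =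
      (match iter f ((f : Int) - 1) [c'] with | [] => -1 | v :: _ => v)) :
    recLoop (fun a' => recAux (f+1) (m - 1) a') m (c * 8) xs =
      (match iter f (m - 1) (kidsL m c xs) with | [] => -1 | v :: _ => v) := by
  induction xs with
  | nil => simp [recLoop, kidsL, iter_nil]
  | cons x xs ihxs =>
      obtain ⟨hx0, hx7⟩ := hxs x (by simp)
      have hxs' : ∀ y ∈ xs, 0 ≤ y ∧ y ≤ 7 := fun y hy => hxs y (by simp [hy])
      have hrt : run prog (c * 8 + x) 0 0 = outB (c * 8 + x) :=
        run_test_eq c x hc hcb hx0 hx7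
      by_cases hcond : outB (c * 8 + x) = PySem.List.slice prog (some m) none
      · have hcb' : c * 8 + x ≤ (8:Int) ^ 16 := matched_bound m (c * 8 + x) hcond
        have hkid : kidsL m c (x :: xs) = (c * 8 + x) :: kidsL m c xs := by
          simp [kidsL, hcond]
        have hs : recAux (f+1) (m - 1) (c * 8 + x) =
            (match iter f (m - 1) [c * 8 + x] with | [] => -1 | v :: _ => v) := by
          rw [hm]; exact ihrec (c * 8 + x) (by omega) hcb'
        have hsplit : iter f (m - 1) ((c * 8 + x) :: kidsL m c xs) =
            iter f (m - 1) [c * 8 + x] ++ iter f (m - 1) (kidsL m c xs) := by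
          have : (c * 8 + x) :: kidsL m c xs = [c * 8 + x] ++ kidsL m c xs := rfl
          rw [this, iter_append]
        rw [hkid, hsplit]
        cases hone : iter f (m - 1) [c * 8 + x] with
        | nil =>
            have : recLoop (fun a' => recAux (f+1) (m - 1) a') m (c * 8) (x :: xs) =
                recLoop (fun a' => recAux (f+1) (m - 1) a') m (c * 8) xs := by
              simp only [recLoop]
              rw [if_pos (hrt.trans hcond), hs, hone]
              simp
            rw [this, ihxs hxs']
            simp
        | cons v tail =>
            have hv0 : 0 ≤ v := iter_nonneg f (m - 1) (c * 8 + x) v (by omega) (by rw [hone]; simp)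
            have : recLoop (fun a' => recAux (f+1) (m - 1) a') m (c * 8) (x :: xs) = v := by
              simp only [recLoop]
              rw [if_pos (hrt.trans hcond), hs, hone]
              have : v ≠ -1 := by omega
              simp [this]
            rw [this]
            simp
      · have hkid : kidsL m c (x :: xs) = kidsL m c xs := by simp [kidsL, hcond]
        have : recLoop (fun a' => recAux (f+1) (m - 1) a') m (c * 8) (x :: xs) =
            recLoop (fun a' => recAux (f+1) (m - 1) a') m (c * 8) xs := by
          simp only [recLoop]
          rw [if_neg (by rw [hrt]; exact hcond)]
        rw [this, hkid, ihxs hxs']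

theorem recAux_eq_head (f : Nat) (c : Int) (hc : 0 ≤ c) (hcb : c ≤ (8:Int) ^ 16) :
    recAux (f+1) ((f : Int) - 1) c =
      (match iter f ((f : Int) - 1) [c] with | [] => -1 | v :: _ => v) := by
  induction f generalizing c with
  | zero => simp [recAux, iter]
  | succ f ih =>
      have hne : ((f + 1 : Nat) : Int) - 1 ≠ -1 := by omega
      have h1 : recAux (f+1+1) (((f+1 : Nat) : Int) - 1) c =
          recLoop (fun a' => recAux (f+1) ((((f+1 : Nat) : Int) - 1) - 1) a')
            (((f+1 : Nat) : Int) - 1) (c * 8) [0, 1, 2, 3, 4, 5, 6, 7] := by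
        simp only [recAux, if_neg hne]
      rw [h1]
      have h2 : iter (f+1) (((f+1 : Nat) : Int) - 1) [c] =
          iter f ((((f+1 : Nat) : Int) - 1) - 1) (kidsL (((f+1 : Nat) : Int) - 1) c [0,1,2,3,4,5,6,7]) := by
        show iter f ((((f+1 : Nat) : Int) - 1) - 1) (step (((f+1 : Nat) : Int) - 1) [c]) = _
        congr 1
        rw [step_eq_flatMap]
        simp [kids]
      rw [h2]
      exact recLoop_eq_head f (((f+1 : Nat) : Int) - 1) c [0,1,2,3,4,5,6,7]
        (by omega) hc hcb (by intro x hx; simp at hx; omega)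
        (fun c' hc' hcb' => ih c' hc' hcb')

-- sortedness: the BFS candidate list is strictly increasing, so min = head
theorem kidsL_sorted (m c : Int) (xs : List Int) (hxs : xs.Pairwise (· < ·)) :
    (kidsL m c xs).Pairwise (· < ·) := by
  unfold kidsL
  rw [List.pairwise_filterMap]
  refine hxs.imp_of_mem ?_
  intro x y hx hy hlt
  intro u hu v hv
  by_cases h1 : outB (c * 8 + x) = PySem.List.slice prog (some m) none
  · by_cases h2 : outB (c * 8 + y) = PySem.List.slice prog (some m) none
    · simp only [h1, if_true, Option.some.injEq] at hu
      simp only [h2, if_true, Option.some.injEq] at hv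
      omega
    · simp [h2] at hv
  · simp [h1] at hu

theorem step_sorted (m : Int) (cs : List Int) (h : cs.Pairwise (· < ·)) :
    (step m cs).Pairwise (· < ·) := by
  rw [step_eq_flatMap, List.pairwise_flatMap]
  constructor
  · intro c _
    exact kidsL_sorted m c _ (by decide)
  · refine h.imp_of_mem ?_
    intro c c' _ _ hlt u hu v hv
    have hb := mem_kids_bound m c u hu
    have hb' := mem_kids_bound m c' v hv
    omega

theorem iter_sorted (f : Nat) (m : Int) (cs : List Int) (h : cs.Pairwise (· < ·)) :
    (iter f m cs).Pairwise (· < ·) := by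
  induction f generalizing m cs with
  | zero => exact h
  | succ f ih => exact ih (m - 1) (step m cs) (step_sorted m cs h)

theorem min?_of_sorted (v : Int) (t : List Int) (h : (v :: t).Pairwise (· < ·)) :
    PySem.List.min? (v :: t) (fun w => w) = some v := by
  cases hmin : PySem.List.min? (v :: t) (fun w => w) with
  | none => exact absurd ((PySem.List.min?_eq_none_iff _ _).mp hmin) (by simp)
  | some w =>
      have hw : w ∈ v :: t := PySem.List.min?_mem hmin
      have hle : w ≤ v := PySem.List.min?_isMin hmin v (by simp)
      have hge : v ≤ w := by
        rcases List.mem_cons.mp hw with h'|h'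
        · omega
        · have := List.rel_of_pairwise_cons h h'
          omega
      have : w = v := by omega
      rw [this]

-- ===== VERDICT (by name: the statement is the Claim_ definition above) =====
theorem rec_spec : Claim_equal_rec := by
  intro n a hdom hpre
  unfold Spec_rec rec rec_alt
  rcases lt_trichotomy n (-1) with hn | hn | hn
  · -- n ≤ -2: A's fuel is 0 (-1 immediately); B's loop exits by fuel with m ≠ -1
    have h2 : (n + 2).toNat = 0 := by omega
    have h1 : (n + 1).toNat = 0 := by omega
    rw [h1, h2]
    have hne : n ≠ -1 := by omega
    simp [recAux, recAltAux, hne]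
  · -- n = -1: both return a
    subst hn
    norm_num
    simp [recAux, recAltAux, PySem.List.min?]
  · -- n ≥ 0, a ≥ 0: DFS-first-hit = min of the BFS solution list
    have ha : 0 ≤ a := by rcases hpre with h|h; exact h; omega
    have hab : a ≤ (8:Int) ^ 16 := by
      simp only [Dom_rec, pvDomInt, Bool.and_eq_true, decide_eq_true_eq] at hdom
      have : (2147483648:Int) ≤ 8 ^ 16 := by norm_num
      omega
    set f : Nat := (n + 1).toNat with hf
    have hfn : (f : Int) - 1 = n := by omega
    have h2 : (n + 2).toNat = f + 1 := by omega
    rw [h2, ← hfn]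
    rw [recAux_eq_head f a ha hab, recAltAux_eq_min f ((f : Int) - 1) [a] rfl]
    have hsorted := iter_sorted f ((f : Int) - 1) [a] (by simp)
    cases hit : iter f ((f : Int) - 1) [a] with
    | nil => simp [PySem.List.min?]
    | cons v t =>
        rw [hit] at hsorted
        rw [min?_of_sorted v t hsorted]
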